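-- pv_equiv track=rewrite | github.com/juy4556/PythonAlgorithm | 잡동/ao/3.py | compare_comb
-- ===== SOURCE A (Python) =====
-- def compare_comb(comb1_sums, comb2_sums):
--     wins, draws, losses = 0, 0, 0
--
--     for sum1, count1 in comb1_sums.items():
--         for sum2, count2 in comb2_sums.items():
--             if sum1 > sum2:
--                 wins += count1 * count2
--             elif sum1 == sum2:
--                 draws += count1 * count2
--             else:
--                 losses += count1 * count2
--
--     return wins, draws, losses
-- ===== SOURCE B (Python) =====
-- def _bisect_left(keys, x):
--     lo, hi = 0, len(keys)
--     while lo < hi: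
--         mid = (lo + hi) // 2
--         if keys[mid] < x:
--             lo = mid + 1
--         else:
--             hi = mid
--     return lo
--
--
-- def _bisect_right(keys, x):
--     lo, hi = 0, len(keys)
--     while lo < hi:
--         mid = (lo + hi) // 2
--         if keys[mid] <= x:
--             lo = mid + 1
--         else:
--             hi = mid
--     return lo
--
--
-- def compare_comb(comb1_sums, comb2_sums):
--     items = sorted(comb2_sums.items(), key=lambda kv: kv[0])
--     keys = [kv[0] for kv in items]
--     prefix = [0]
--     for kv in items:
--         prefix.append(prefix[-1] + kv[1])
--     total = prefix[-1]
--
--     wins, draws, losses = 0, 0, 0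
--     for sum1, count1 in comb1_sums.items():
--         i = _bisect_left(keys, sum1)
--         j = _bisect_right(keys, sum1)
--         wins += count1 * prefix[i]
--         draws += count1 * (prefix[j] - prefix[i])
--         losses += count1 * (total - prefix[j])
--     return wins, draws, losses
-- ===== Notes on version B (the rewrite author's own statement) =====
-- stated objective: faster
-- what changed: Replaces A's nested loop over all pairs by sorting comb2's items once, building prefix sums of counts, and answering each comb1 sum with two binary searches.
import Mathlib
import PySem

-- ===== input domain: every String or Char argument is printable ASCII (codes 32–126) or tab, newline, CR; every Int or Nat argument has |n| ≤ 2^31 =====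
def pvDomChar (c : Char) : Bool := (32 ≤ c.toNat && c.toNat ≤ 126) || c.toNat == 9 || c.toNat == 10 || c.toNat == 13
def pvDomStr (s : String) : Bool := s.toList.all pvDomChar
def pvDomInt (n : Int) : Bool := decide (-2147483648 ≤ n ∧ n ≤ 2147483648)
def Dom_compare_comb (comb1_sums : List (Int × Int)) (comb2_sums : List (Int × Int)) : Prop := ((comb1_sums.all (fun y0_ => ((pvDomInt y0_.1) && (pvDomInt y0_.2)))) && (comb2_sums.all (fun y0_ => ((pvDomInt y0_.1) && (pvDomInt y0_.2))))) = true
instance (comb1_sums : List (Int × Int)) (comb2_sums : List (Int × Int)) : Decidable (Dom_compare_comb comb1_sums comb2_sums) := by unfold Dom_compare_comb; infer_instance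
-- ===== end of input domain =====

-- B replaces A's all-pairs nested loop by sorting comb2 once with prefix-sum counts and two
-- binary searches per comb1 sum (asymptotically faster as measured on the timing inputs).

-- ===== PORT A =====
-- literal port of A: nested loop over both item lists, accumulating (wins, draws, losses)
def compare_comb (comb1_sums : List (Int × Int)) (comb2_sums : List (Int × Int)) : Int × Int × Int :=
  comb1_sums.foldl (fun st p =>
    comb2_sums.foldl (fun st q =>
      if p.1 > q.1 then (st.1 + p.2 * q.2, st.2.1, st.2.2)
      else if p.1 = q.1 then (st.1, st.2.1 + p.2 * q.2, st.2.2)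
      else (st.1, st.2.1, st.2.2 + p.2 * q.2)) st) (0, 0, 0)

-- ===== PORT B =====
-- _bisect_left of Source B: lo/hi are Nat (in Python they stay in [0, len]); keys[mid] is in range,
-- so the getD default is never read
def pvBisectLeft (keys : List Int) (x : Int) (lo hi : Nat) : Nat :=
  if lo < hi then
    let mid := (lo + hi) / 2
    if keys.getD mid 0 < x then pvBisectLeft keys x (mid + 1) hi
    else pvBisectLeft keys x lo mid
  else lo
termination_by hi - lo
decreasing_by all_goals omega

-- _bisect_right of Source B
def pvBisectRight (keys : List Int) (x : Int) (lo hi : Nat) : Nat :=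
  if lo < hi then
    let mid := (lo + hi) / 2
    if keys.getD mid 0 ≤ x then pvBisectRight keys x (mid + 1) hi
    else pvBisectRight keys x lo mid
  else lo
termination_by hi - lo
decreasing_by all_goals omega

-- body of Source B's prefix loop: prefix.append(prefix[-1] + kv[1])
def pvPrefixStep (acc : List Int) (kv : Int × Int) : List Int :=
  acc ++ [PySem.List.pyGetD acc (-1) 0 + kv.2]

-- port of B: sort comb2's items by key, prefix sums of counts, two binary searches per comb1 sum
def compare_comb_alt (comb1_sums : List (Int × Int)) (comb2_sums : List (Int × Int)) : Int × Int × Int :=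
  let items := PySem.List.sorted comb2_sums (fun kv => kv.1) false
  let keys := items.map (fun kv => kv.1)
  let pre := items.foldl pvPrefixStep [0]
  let total := PySem.List.pyGetD pre (-1) 0
  comb1_sums.foldl (fun st p =>
    let i := pvBisectLeft keys p.1 0 keys.length
    let j := pvBisectRight keys p.1 0 keys.length
    (st.1 + p.2 * pre.getD i 0,
     st.2.1 + p.2 * (pre.getD j 0 - pre.getD i 0),
     st.2.2 + p.2 * (total - pre.getD j 0))) (0, 0, 0)

-- ===== PRECONDITION & SPEC =====
def Spec_compare_comb (comb1_sums : List (Int × Int)) (comb2_sums : List (Int × Int)) (out : Int × Int × Int) : Prop := out = compare_comb_alt comb1_sums comb2_sums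
instance (comb1_sums : List (Int × Int)) (comb2_sums : List (Int × Int)) (out : Int × Int × Int) : Decidable (Spec_compare_comb comb1_sums comb2_sums out) := by unfold Spec_compare_comb; infer_instance

-- ===== CLAIM (what is proved, stated in full; the proofs are below) =====
def Claim_equal_compare_comb : Prop := ∀ (comb1_sums : List (Int × Int)) (comb2_sums : List (Int × Int)), Dom_compare_comb comb1_sums comb2_sums → Spec_compare_comb comb1_sums comb2_sums (compare_comb comb1_sums comb2_sums)

-- ===== LEMMAS AND PROOFS =====

-- weighted count: total count-weight of the comb2 items satisfying p
def pvW (p : Int × Int → Bool) (xs : List (Int × Int)) : Int := ((xs.filter p).map (fun q => q.2)).sum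

-- running prefix sums of counts, starting after s
def pvScan (s : Int) : List (Int × Int) → List Int
  | [] => []
  | q :: t => (s + q.2) :: pvScan (s + q.2) t

theorem pvScan_length (items : List (Int × Int)) : ∀ s, (pvScan s items).length = items.length := by
  induction items with
  | nil => intro s; rfl
  | cons q t ih => intro s; simp [pvScan, ih]

theorem pvPrefix_eq (items : List (Int × Int)) :
    ∀ (acc : List Int) (x : Int), items.foldl pvPrefixStep (acc ++ [x]) = acc ++ [x] ++ pvScan x items := by
  induction items with
  | nil => intro acc x; simp [pvScan]
  | cons q t ih =>
      intro acc x
      have h1 : pvPrefixStep (acc ++ [x]) q = (acc ++ [x]) ++ [x + q.2] := by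
        simp [pvPrefixStep, PySem.List.pyGetD_neg_one_append_singleton]
      simp only [List.foldl_cons, h1]
      rw [ih (acc ++ [x]) (x + q.2)]
      simp [pvScan]

theorem pvScan_getD (items : List (Int × Int)) :
    ∀ (s : Int) (i : Nat), i ≤ items.length →
      (s :: pvScan s items).getD i 0 = s + ((items.take i).map (fun q => q.2)).sum := by
  induction items with
  | nil => intro s i hi; cases i <;> simp_all
  | cons q t ih =>
      intro s i hi
      cases i with
      | zero => simp
      | succ n =>
          have := ih (s + q.2) n (by simpa using hi)
          simp only [pvScan, List.getD_cons_succ] at this ⊢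
          rw [this]; simp [List.take_succ_cons]; ring

-- in a sorted key list, the keys satisfying a downward-closed predicate are exactly the first countP
theorem pvSorted_iff (p : Int → Bool) (hmono : ∀ a b : Int, a ≤ b → p b = true → p a = true) :
    ∀ (ks : List Int), ks.Pairwise (· ≤ ·) →
      ∀ m, m < ks.length → (p (ks.getD m 0) = true ↔ m < ks.countP p) := by
  intro ks
  induction ks with
  | nil => intro _ m hm; simp at hm
  | cons k t ih =>
      intro hp m hm
      have hkt : ∀ b ∈ t, k ≤ b := (List.pairwise_cons.mp hp).1
      have hpt := (List.pairwise_cons.mp hp).2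
      by_cases hk : p k = true
      · have hc : (k :: t).countP p = t.countP p + 1 := by simp [hk]
        cases m with
        | zero => simpa [hc] using hk
        | succ n =>
            have := ih hpt n (by simpa using hm)
            simpa [hc] using this
      · have ht0 : t.countP p = 0 := by
          rw [List.countP_eq_zero]
          intro b hb hpb
          exact hk (hmono k b (hkt b hb) hpb)
        have hc : (k :: t).countP p = 0 := by simp [hk, ht0]
        cases m with
        | zero => simp [hc, hk]
        | succ n =>
            have hn : n < t.length := by simpa using hm
            have hmem : t.getD n 0 ∈ t := by
              have : t.getD n 0 = t[n] := List.getD_eq_getElem t 0 hn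
              rw [this]; exact List.getElem_mem hn
            constructor
            · intro hpb
              exact absurd (hk (hmono k _ (hkt _ hmem) (by simpa using hpb))) (by simp)
            · intro h; omega

theorem pvBisectLeft_inv (ks : List Int) (x : Int)
    (hiff : ∀ m, m < ks.length → (ks.getD m 0 < x ↔ m < ks.countP (fun k => decide (k < x)))) :
    ∀ (n lo hi : Nat), hi - lo = n → lo ≤ ks.countP (fun k => decide (k < x)) →
      ks.countP (fun k => decide (k < x)) ≤ hi → hi ≤ ks.length →
      pvBisectLeft ks x lo hi = ks.countP (fun k => decide (k < x)) := by
  intro n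
  induction n using Nat.strong_induction_on with
  | _ n ih =>
      intro lo hi hn hlo hhi hlen
      rw [pvBisectLeft]
      by_cases h : lo < hi
      · simp only [if_pos h]
        have hmid : (lo + hi) / 2 < ks.length := by omega
        by_cases hk : ks.getD ((lo + hi) / 2) 0 < x
        · simp only [if_pos hk]
          have := (hiff _ hmid).mp hk
          exact ih (hi - ((lo + hi) / 2 + 1)) (by omega) _ hi rfl (by omega) hhi hlen
        · simp only [if_neg hk]
          have : ¬ ((lo + hi) / 2 < ks.countP (fun k => decide (k < x))) :=
            fun hc => hk ((hiff _ hmid).mpr hc)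
          exact ih ((lo + hi) / 2 - lo) (by omega) lo _ rfl hlo (by omega) (by omega)
      · simp only [if_neg h]
        omega

theorem pvBisectLeft_eq (ks : List Int) (x : Int) (hs : ks.Pairwise (· ≤ ·)) :
    pvBisectLeft ks x 0 ks.length = ks.countP (fun k => decide (k < x)) := by
  have hiff := pvSorted_iff (fun k => decide (k < x))
    (by intro a b hab hb; simp at hb ⊢; omega) ks hs
  exact pvBisectLeft_inv ks x
    (by intro m hm; simpa using hiff m hm)
    ks.length 0 ks.length rfl (by omega) List.countP_le_length le_rfl

theorem pvBisectRight_inv (ks : List Int) (x : Int)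
    (hiff : ∀ m, m < ks.length → (ks.getD m 0 ≤ x ↔ m < ks.countP (fun k => decide (k ≤ x)))) :
    ∀ (n lo hi : Nat), hi - lo = n → lo ≤ ks.countP (fun k => decide (k ≤ x)) →
      ks.countP (fun k => decide (k ≤ x)) ≤ hi → hi ≤ ks.length →
      pvBisectRight ks x lo hi = ks.countP (fun k => decide (k ≤ x)) := by
  intro n
  induction n using Nat.strong_induction_on with
  | _ n ih =>
      intro lo hi hn hlo hhi hlen
      rw [pvBisectRight]
      by_cases h : lo < hi
      · simp only [if_pos h]
        have hmid : (lo + hi) / 2 < ks.length := by omega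
        by_cases hk : ks.getD ((lo + hi) / 2) 0 ≤ x
        · simp only [if_pos hk]
          have := (hiff _ hmid).mp hk
          exact ih (hi - ((lo + hi) / 2 + 1)) (by omega) _ hi rfl (by omega) hhi hlen
        · simp only [if_neg hk]
          have : ¬ ((lo + hi) / 2 < ks.countP (fun k => decide (k ≤ x))) :=
            fun hc => hk ((hiff _ hmid).mpr hc)
          exact ih ((lo + hi) / 2 - lo) (by omega) lo _ rfl hlo (by omega) (by omega)
      · simp only [if_neg h]
        omega

theorem pvBisectRight_eq (ks : List Int) (x : Int) (hs : ks.Pairwise (· ≤ ·)) :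
    pvBisectRight ks x 0 ks.length = ks.countP (fun k => decide (k ≤ x)) := by
  have hiff := pvSorted_iff (fun k => decide (k ≤ x))
    (by intro a b hab hb; simp at hb ⊢; omega) ks hs
  exact pvBisectRight_inv ks x
    (by intro m hm; simpa using hiff m hm)
    ks.length 0 ks.length rfl (by omega) List.countP_le_length le_rfl

-- on a key-sorted list, the items whose key satisfies a downward-closed predicate are an initial segment
theorem pvFilter_eq_take (p : Int → Bool) (hmono : ∀ a b : Int, a ≤ b → p b = true → p a = true) :
    ∀ (items : List (Int × Int)), items.Pairwise (fun a b => a.1 ≤ b.1) →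
      items.filter (fun q => p q.1) = items.take (items.countP (fun q => p q.1)) := by
  intro items
  induction items with
  | nil => intro _; rfl
  | cons q t ih =>
      intro hp
      have hqt := (List.pairwise_cons.mp hp).1
      have hpt := (List.pairwise_cons.mp hp).2
      by_cases hq : p q.1 = true
      · simp [hq, ih hpt]
      · have ht0 : t.countP (fun q => p q.1) = 0 := by
          rw [List.countP_eq_zero]
          intro b hb hpb
          exact hq (hmono q.1 b.1 (hqt b hb) hpb)
        have htf : t.filter (fun q => p q.1) = [] := by
          rw [List.filter_eq_nil_iff]
          intro b hb hpb
          exact hq (hmono q.1 b.1 (hqt b hb) hpb)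
        simp [hq, ht0, htf]

-- decompositions of the weighted counts
theorem pvW_le_split (x : Int) (xs : List (Int × Int)) :
    pvW (fun q => decide (q.1 ≤ x)) xs
      = pvW (fun q => decide (q.1 < x)) xs + pvW (fun q => decide (x = q.1)) xs := by
  induction xs with
  | nil => rfl
  | cons q t ih =>
      by_cases h1 : q.1 < x
      · simp [pvW, h1, le_of_lt h1, show ¬ (x = q.1) by omega] at ih ⊢; omega
      · by_cases h2 : x = q.1
        · simp [pvW, h2] at ih ⊢; omega
        · simp [pvW, h1, h2, show ¬ (q.1 ≤ x) by omega] at ih ⊢; omega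

theorem pvW_total_split (x : Int) (xs : List (Int × Int)) :
    (xs.map (fun q => q.2)).sum
      = pvW (fun q => decide (q.1 ≤ x)) xs + pvW (fun q => decide (x < q.1)) xs := by
  induction xs with
  | nil => rfl
  | cons q t ih =>
      by_cases h1 : q.1 ≤ x
      · simp [pvW, h1, show ¬ (x < q.1) by omega] at ih ⊢; omega
      · simp [pvW, h1, show x < q.1 by omega] at ih ⊢; omega

-- A's inner loop computes the three weighted counts at once
theorem pvInner_eq (s c : Int) (xs : List (Int × Int)) :
    ∀ st : Int × Int × Int,
      xs.foldl (fun st q =>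
        if s > q.1 then (st.1 + c * q.2, st.2.1, st.2.2)
        else if s = q.1 then (st.1, st.2.1 + c * q.2, st.2.2)
        else (st.1, st.2.1, st.2.2 + c * q.2)) st
      = (st.1 + c * pvW (fun q => decide (q.1 < s)) xs,
         st.2.1 + c * pvW (fun q => decide (s = q.1)) xs,
         st.2.2 + c * pvW (fun q => decide (s < q.1)) xs) := by
  induction xs with
  | nil => intro st; simp [pvW]
  | cons q t ih =>
      intro st
      by_cases h1 : s > q.1
      · simp only [List.foldl_cons, if_pos h1]
        rw [ih]
        simp [pvW, h1, show ¬ (s = q.1) by omega, show ¬ (s < q.1) by omega]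
        ring
      · by_cases h2 : s = q.1
        · simp only [List.foldl_cons, if_neg h1, if_pos h2]
          rw [ih]
          simp [pvW, h2]
          ring
        · simp only [List.foldl_cons, if_neg h1, if_neg h2]
          rw [ih]
          simp [pvW, show ¬ (q.1 < s) by omega, h2, show s < q.1 by omega]
          ring

-- the per-comb1-item values B reads from prefix are exactly A's weighted counts
theorem pvB_step_eq (comb2_sums : List (Int × Int)) (s : Int) :
    (((PySem.List.sorted comb2_sums (fun kv => kv.1) false).foldl pvPrefixStep [0]).getD
        (pvBisectLeft ((PySem.List.sorted comb2_sums (fun kv => kv.1) false).map (fun kv => kv.1)) s 0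
          ((PySem.List.sorted comb2_sums (fun kv => kv.1) false).map (fun kv => kv.1)).length) 0
      = pvW (fun q => decide (q.1 < s)) comb2_sums)
    ∧ (((PySem.List.sorted comb2_sums (fun kv => kv.1) false).foldl pvPrefixStep [0]).getD
        (pvBisectRight ((PySem.List.sorted comb2_sums (fun kv => kv.1) false).map (fun kv => kv.1)) s 0
          ((PySem.List.sorted comb2_sums (fun kv => kv.1) false).map (fun kv => kv.1)).length) 0
      = pvW (fun q => decide (q.1 ≤ s)) comb2_sums)
    ∧ (PySem.List.pyGetD ((PySem.List.sorted comb2_sums (fun kv => kv.1) false).foldl pvPrefixStep [0]) (-1) 0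
      = (comb2_sums.map (fun q => q.2)).sum) := by
  set items := PySem.List.sorted comb2_sums (fun kv => kv.1) false with hitems
  have hperm : items.Perm comb2_sums := PySem.List.sorted_perm comb2_sums (fun kv => kv.1) false
  have hpair : items.Pairwise (fun a b => a.1 ≤ b.1) := PySem.List.sorted_pairwise comb2_sums (fun kv => kv.1)
  have hkeys : ((items.map (fun kv => kv.1)) : List Int).Pairwise (· ≤ ·) := by
    simpa using PySem.List.sorted_map_key_pairwise comb2_sums (fun kv => kv.1)
  have hpre : items.foldl pvPrefixStep [0] = 0 :: pvScan 0 items := by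
    simpa using pvPrefix_eq items [] 0
  have hW : ∀ p : Int × Int → Bool, pvW p items = pvW p comb2_sums := by
    intro p
    exact List.Perm.sum_eq (List.Perm.map _ (hperm.filter p))
  have hcount : ∀ p : Int → Bool,
      (items.map (fun kv => kv.1)).countP p = items.countP (fun q => p q.1) := by
    intro p; rw [List.countP_map]; rfl
  have hgetD : ∀ p : Int → Bool, (∀ a b : Int, a ≤ b → p b = true → p a = true) →
      (items.foldl pvPrefixStep [0]).getD (items.countP (fun q => p q.1)) 0
        = pvW (fun q => p q.1) items := by
    intro p hmono
    rw [hpre, pvScan_getD items 0 _ List.countP_le_length, zero_add,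
      ← pvFilter_eq_take p hmono items hpair]
    rfl
  refine ⟨?_, ?_, ?_⟩
  · rw [pvBisectLeft_eq _ _ hkeys, hcount, hgetD (fun k => decide (k < s))
      (by intro a b hab hb; simp at hb ⊢; omega), hW]
  · rw [pvBisectRight_eq _ _ hkeys, hcount, hgetD (fun k => decide (k ≤ s))
      (by intro a b hab hb; simp at hb ⊢; omega), hW]
  · have hne : items.foldl pvPrefixStep [0] ≠ [] := by
      rw [hpre]; simp
    rw [PySem.List.pyGetD_neg_one _ _ hne, List.getLast_eq_getElem]
    have hlen : (items.foldl pvPrefixStep [0]).length = items.length + 1 := by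
      rw [hpre]; simp [pvScan_length]
    have h1 : (items.foldl pvPrefixStep [0])[(items.foldl pvPrefixStep [0]).length - 1] =
        (items.foldl pvPrefixStep [0]).getD ((items.foldl pvPrefixStep [0]).length - 1) 0 :=
      (List.getD_eq_getElem _ _ (by omega)).symm
    rw [h1, hlen]
    simp only [Nat.add_sub_cancel]
    rw [hpre, pvScan_getD items 0 _ le_rfl, zero_add, List.take_length]
    exact List.Perm.sum_eq (List.Perm.map _ hperm)

-- ===== VERDICT (by name: the statement is the Claim_ definition above) =====
theorem compare_comb_spec : Claim_equal_compare_comb := by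
  intro comb1_sums comb2_sums _
  show compare_comb comb1_sums comb2_sums = compare_comb_alt comb1_sums comb2_sums
  simp only [compare_comb, compare_comb_alt]
  apply List.foldl_ext
  intro st p _
  rw [pvInner_eq]
  obtain ⟨h1, h2, h3⟩ := pvB_step_eq comb2_sums p.1
  rw [h1, h2, h3, pvW_total_split p.1 comb2_sums, pvW_le_split p.1 comb2_sums]
  refine Prod.ext ?_ (Prod.ext ?_ ?_) <;> simp
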